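-- pv_equiv track=rewrite | github.com/martinetoering/KRR-course | hw3/asp_planner_core.py | get_predicate_code
-- ===== SOURCE A (Python) =====
-- def get_predicate_code(predicate, name, args, T=None, neg=False):
--     """ Formats one part of a line of the program given name and arg, higher
--         order predicate and the time part of the higher order predicate as
--         string, if applicable. """
--     predicate_code = ""
--     if predicate == "":
--         # There is no higher order predicate and we use name as function.
--         if args:
--             predicate_code += "{}(".format(name)
--             for arg in args:
--                 predicate_code += """{}, """.format(arg)
--             predicate_code = predicate_code[:-2] + ")"
--         else:
--             predicate_code += "{}".format(name)
--     else:
--         if neg: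
--             # Use negation around name as higher order predicate.
--             if args:
--                 predicate_code += "{}(neg({}(".format(predicate, name)
--                 for arg in args:
--                     predicate_code += """{}, """.format(arg)
--                 if T:
--                     predicate_code = predicate_code[:-2] + ")), {})".format(T)
--                 else:
--                     predicate_code = predicate_code[:-2] + ")))"
--             else:
--                 if T:
--                     predicate_code += "{}(neg({}), {})".format(predicate, name, T)
--                 else:
--                     predicate_code += "{}(neg({}))".format(predicate, name)
--         else:
--             # Normal case: use given predicate as predicate for name and format
--             # args.
--             if args:
--                 predicate_code += "{}({}(".format(predicate, name)
--                 for arg in args: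
--                     predicate_code += """{}, """.format(arg)
--                 if T:
--                     predicate_code = predicate_code[:-2] + "), {})".format(T)
--                 else:
--                     predicate_code = predicate_code[:-2] + "))"
--             else:
--                 if T:
--                     predicate_code += "{}({}, {})".format(predicate, name, T)
--                 else:
--                     predicate_code += "{}({})".format(predicate, name)
--     return predicate_code
-- ===== SOURCE B (Python) =====
-- def get_predicate_code(predicate, name, args, T=None, neg=False):
--     """Compose from the inside out: build the name(args) core once, then wrap."""
--     if args:
--         core = "{}({})".format(name, ", ".join("{}".format(a) for a in args))
--     else:
--         core = "{}".format(name)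
--     if predicate == "":
--         return core
--     inner = "neg({})".format(core) if neg else core
--     if T:
--         return "{}({}, {})".format(predicate, inner, T)
--     return "{}({})".format(predicate, inner)
-- ===== Notes on version B (the rewrite author's own statement) =====
-- stated objective: simpler
-- what changed: B builds the name(args) core once with ', '.join and then layers the neg/predicate/T wrappers, replacing A's six duplicated branches each with its own append-loop and trailing-comma trimming.
import Mathlib
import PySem

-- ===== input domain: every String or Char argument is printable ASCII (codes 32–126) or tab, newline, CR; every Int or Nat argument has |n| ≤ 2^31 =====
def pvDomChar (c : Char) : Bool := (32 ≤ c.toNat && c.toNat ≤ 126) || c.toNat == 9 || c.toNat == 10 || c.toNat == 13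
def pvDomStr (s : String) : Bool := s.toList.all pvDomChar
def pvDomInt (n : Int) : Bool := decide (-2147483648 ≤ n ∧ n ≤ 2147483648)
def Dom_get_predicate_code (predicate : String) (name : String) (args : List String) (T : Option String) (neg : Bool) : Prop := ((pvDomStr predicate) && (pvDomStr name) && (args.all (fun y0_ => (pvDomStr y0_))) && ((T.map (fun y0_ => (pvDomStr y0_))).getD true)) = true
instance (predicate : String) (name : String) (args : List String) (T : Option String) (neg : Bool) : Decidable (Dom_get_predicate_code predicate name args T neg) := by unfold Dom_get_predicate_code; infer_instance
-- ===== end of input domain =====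

-- B simplifies A: it builds the name(args) core once and layers the neg/predicate/T
-- wrappers, instead of A's six duplicated branches with per-branch trailing-comma trimming.

-- ===== PORT A =====
-- 'if T:' — Python truthiness of the Optional[str] T: some nonempty string
def pyTruthyOpt (T : Option String) : Bool :=
  match T with
  | none => false
  | some t => !t.toList.isEmpty

-- the accumulation loop 'for arg in args: predicate_code += "{}, ".format(arg)'
def argLoop (acc : List Char) (args : List String) : List Char :=
  args.foldl (fun acc a => acc ++ a.toList ++ [',', ' ']) acc

-- literal transliteration of A; the string state is carried as List Char
def get_predicate_code (predicate : String) (name : String) (args : List String) (T : Option String) (neg : Bool) : String :=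
  let pc : List Char := []
  if predicate.toList.isEmpty then
    if !args.isEmpty then
      let pc := pc ++ name.toList ++ ['(']
      let pc := argLoop pc args
      String.ofList (PySem.List.slice pc none (some (-2)) ++ [')'])
    else
      String.ofList (pc ++ name.toList)
  else
    if neg then
      if !args.isEmpty then
        let pc := pc ++ predicate.toList ++ "(neg(".toList ++ name.toList ++ ['(']
        let pc := argLoop pc args
        if pyTruthyOpt T then
          String.ofList (PySem.List.slice pc none (some (-2)) ++ ")), ".toList ++ (T.getD "").toList ++ [')'])
        else
          String.ofList (PySem.List.slice pc none (some (-2)) ++ ")))".toList)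
      else
        if pyTruthyOpt T then
          String.ofList (pc ++ predicate.toList ++ "(neg(".toList ++ name.toList ++ "), ".toList ++ (T.getD "").toList ++ [')'])
        else
          String.ofList (pc ++ predicate.toList ++ "(neg(".toList ++ name.toList ++ "))".toList)
    else
      if !args.isEmpty then
        let pc := pc ++ predicate.toList ++ ['('] ++ name.toList ++ ['(']
        let pc := argLoop pc args
        if pyTruthyOpt T then
          String.ofList (PySem.List.slice pc none (some (-2)) ++ "), ".toList ++ (T.getD "").toList ++ [')'])
        else
          String.ofList (PySem.List.slice pc none (some (-2)) ++ "))".toList)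
      else
        if pyTruthyOpt T then
          String.ofList (pc ++ predicate.toList ++ ['('] ++ name.toList ++ ", ".toList ++ (T.getD "").toList ++ [')'])
        else
          String.ofList (pc ++ predicate.toList ++ ['('] ++ name.toList ++ [')'])

-- ===== PORT B =====
-- literal transliteration of Source B: build the core once, then wrap
def get_predicate_code_alt (predicate : String) (name : String) (args : List String) (T : Option String) (neg : Bool) : String :=
  let core : List Char :=
    if !args.isEmpty then
      name.toList ++ ['('] ++ List.intercalate [',', ' '] (args.map String.toList) ++ [')']
    else
      name.toList
  if predicate.toList.isEmpty then String.ofList core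
  else
    let inner : List Char := if neg then "neg(".toList ++ core ++ [')'] else core
    match T with
    | some t =>
        if !t.toList.isEmpty then
          String.ofList (predicate.toList ++ ['('] ++ inner ++ [',', ' '] ++ t.toList ++ [')'])
        else
          String.ofList (predicate.toList ++ ['('] ++ inner ++ [')'])
    | none => String.ofList (predicate.toList ++ ['('] ++ inner ++ [')'])

-- ===== PRECONDITION & SPEC =====
def Spec_get_predicate_code (predicate : String) (name : String) (args : List String) (T : Option String) (neg : Bool) (out : String) : Prop := out = get_predicate_code_alt predicate name args T neg
instance (predicate : String) (name : String) (args : List String) (T : Option String) (neg : Bool) (out : String) : Decidable (Spec_get_predicate_code predicate name args T neg out) := by unfold Spec_get_predicate_code; infer_instance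

-- ===== CLAIM (what is proved, stated in full; the proofs are below) =====
def Claim_equal_get_predicate_code : Prop := ∀ (predicate : String) (name : String) (args : List String) (T : Option String) (neg : Bool), Dom_get_predicate_code predicate name args T neg → Spec_get_predicate_code predicate name args T neg (get_predicate_code predicate name args T neg)

-- ===== LEMMAS AND PROOFS =====

-- A's append loop equals prefix ++ join ++ trailing separator, for nonempty args
theorem argLoop_eq (p : List Char) (l : List String) (hl : l ≠ []) :
    argLoop p l = p ++ List.intercalate [',', ' '] (l.map String.toList) ++ [',', ' '] := by
  induction l generalizing p with
  | nil => exact absurd rfl hl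
  | cons a t ih =>
    cases t with
    | nil => simp [argLoop, List.intercalate]
    | cons b u =>
      have := ih (p ++ a.toList ++ [',', ' ']) (by simp)
      simp only [argLoop, List.foldl_cons] at this ⊢
      rw [this]
      simp [List.intercalate]

-- trimming the trailing ", " with xs[:-2]
theorem slice_trim (x : List Char) :
    PySem.List.slice (x ++ [',', ' ']) none (some (-2)) = x := by
  rw [PySem.List.slice_to_neg_ofNat _ 2 (by omega)]
  simp

theorem get_predicate_code_eq (predicate : String) (name : String) (args : List String) (T : Option String) (neg : Bool) :
    get_predicate_code predicate name args T neg = get_predicate_code_alt predicate name args T neg := by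
  by_cases ha : args.isEmpty
  · unfold get_predicate_code get_predicate_code_alt pyTruthyOpt
    rcases T with _ | t <;> cases neg <;> by_cases hp : predicate.toList.isEmpty <;>
      simp [ha, hp]
  · have key : ∀ p : List Char, PySem.List.slice (argLoop p args) none (some (-2)) =
        p ++ List.intercalate [',', ' '] (args.map String.toList) := by
      intro p
      rw [argLoop_eq p args (by simpa using ha)]
      exact slice_trim _
    unfold get_predicate_code get_predicate_code_alt pyTruthyOpt
    rcases T with _ | t <;> cases neg <;> by_cases hp : predicate.toList.isEmpty <;>
      simp [ha, hp, key]

-- ===== VERDICT (by name: the statement is the Claim_ definition above) =====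
theorem get_predicate_code_spec : Claim_equal_get_predicate_code := by
  intro predicate name args T neg _
  exact get_predicate_code_eq predicate name args T neg
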